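-- pv_equiv track=rewrite | github.com/chaosnabilera/problemsolving | codeforces/1313a.py | solve
-- ===== SOURCE A (Python) =====
-- def solve(a,b,c):
-- 	slist = [a,b,c]
-- 	slist.sort()
-- 	a,b,c = slist
-- 	mlist = [(0,0,1),(0,1,0),(1,0,0),(0,1,1),(1,0,1),(1,1,0),(1,1,1)]
-- 	cnt = 0
--
-- 	for da,db,dc in mlist:
-- 		if a>=da and b>=db and c>=dc:
-- 			a -= da
-- 			b -= db
-- 			c -= dc
-- 			cnt += 1
--
-- 	return cnt
-- ===== SOURCE B (Python) =====
-- ORDERS = [(0, 0, 1), (0, 1, 0), (1, 0, 0), (0, 1, 1), (1, 0, 1), (1, 1, 0), (1, 1, 1)]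
--
-- def solve(a, b, c):
--     best = 0
--     for mask in range(128):
--         da = db = dc = 0
--         n = 0
--         for i in range(7):
--             if mask >> i & 1:
--                 oa, ob, oc = ORDERS[i]
--                 da += oa; db += ob; dc += oc
--                 n += 1
--         if da <= a and db <= b and dc <= c and n > best:
--             best = n
--     return best
-- ===== Notes on version B (the rewrite author's own statement) =====
-- stated objective: alternative
-- what changed: Replaces A's sort-then-fixed-order greedy over the seven order types with an exhaustive bitmask search over all 2^7 subsets of orders, keeping the best feasible subset size.
import Mathlib
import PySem

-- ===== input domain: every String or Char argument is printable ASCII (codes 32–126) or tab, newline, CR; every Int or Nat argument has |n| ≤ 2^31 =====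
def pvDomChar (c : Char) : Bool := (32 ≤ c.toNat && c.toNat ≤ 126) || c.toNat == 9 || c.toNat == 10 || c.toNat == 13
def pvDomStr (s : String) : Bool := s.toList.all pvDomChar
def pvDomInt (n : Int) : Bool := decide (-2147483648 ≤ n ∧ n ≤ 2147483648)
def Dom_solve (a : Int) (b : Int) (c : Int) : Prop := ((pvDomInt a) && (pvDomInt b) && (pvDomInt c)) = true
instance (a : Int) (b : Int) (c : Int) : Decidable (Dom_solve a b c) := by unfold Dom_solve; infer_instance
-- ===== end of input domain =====

-- B replaces A's sort-then-fixed-order greedy with an exhaustive search over all 2^7 subsets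
-- of the seven order types (objective: alternative; same constant-time cost class).

-- ===== PORT A =====
-- the loop body of A, over the current (a, b, c, cnt) state
def solveStep (st : Int × Int × Int × Int) (m : Int × Int × Int) : Int × Int × Int × Int :=
  let (a, b, c, cnt) := st
  let (da, db, dc) := m
  if a ≥ da ∧ b ≥ db ∧ c ≥ dc then (a - da, b - db, c - dc, cnt + 1) else (a, b, c, cnt)

def solve (a : Int) (b : Int) (c : Int) : Int :=
  -- slist = [a,b,c]; slist.sort(); a,b,c = slist
  match PySem.List.sorted [a, b, c] (fun x => x) false with
  | [a, b, c] =>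
    let mlist : List (Int × Int × Int) := [(0,0,1),(0,1,0),(1,0,0),(0,1,1),(1,0,1),(1,1,0),(1,1,1)]
    (mlist.foldl solveStep (a, b, c, 0)).2.2.2
  | _ => 0  -- unreachable: sorted keeps the length 3, so the unpack never fails

-- ===== PORT B =====
def pvOrders : List (Int × Int × Int) := [(0,0,1),(0,1,0),(1,0,0),(0,1,1),(1,0,1),(1,1,0),(1,1,1)]

-- the inner 'for i in range(7)' of Source B: demands (da, db, dc) and order count n of a mask
def pvDemand (mask : Int) : Int × Int × Int × Int :=
  (PySem.List.pyRange 0 7 1).foldl (fun (st : Int × Int × Int × Int) i =>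
    let (da, db, dc, n) := st
    -- 'mask >> i & 1' is truthy iff ≠ 0; i ∈ [0,7) so i.toNat is exact
    if Int.land (mask >>> i.toNat) 1 ≠ 0 then  -- 'mask >> i & 1' truthy
      let (oa, ob, oc) := PySem.List.pyGetD pvOrders i ((0 : Int), (0 : Int), (0 : Int))
      (da + oa, db + ob, dc + oc, n + 1)
    else (da, db, dc, n)) (0, 0, 0, 0)

def solve_alt (a : Int) (b : Int) (c : Int) : Int :=
  (PySem.List.pyRange 0 128 1).foldl (fun best mask =>
    let (da, db, dc, n) := pvDemand mask
    if da ≤ a ∧ db ≤ b ∧ dc ≤ c ∧ n > best then n else best) 0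

-- ===== PRECONDITION & SPEC =====
def Spec_solve (a : Int) (b : Int) (c : Int) (out : Int) : Prop := out = solve_alt a b c
instance (a : Int) (b : Int) (c : Int) (out : Int) : Decidable (Spec_solve a b c out) := by unfold Spec_solve; infer_instance

-- ===== CLAIM (what is proved, stated in full; the proofs are below) =====
def Claim_equal_solve : Prop := ∀ (a : Int) (b : Int) (c : Int), Dom_solve a b c → Spec_solve a b c (solve a b c)

-- ===== LEMMAS AND PROOFS =====

-- clamp to [-1, 4]: both programs only distinguish values in this window
def pvCl (x : Int) : Int := if x < -1 then -1 else if x > 4 then 4 else x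

lemma pvCl_mono {x y : Int} (h : x ≤ y) : pvCl x ≤ pvCl y := by
  unfold pvCl; split_ifs <;> omega

lemma pvCl_mem (x : Int) : pvCl x ∈ Finset.Icc (-1 : Int) 4 := by
  simp only [Finset.mem_Icc]; unfold pvCl; split_ifs <;> omega

lemma pvCl_iff (x : Int) : ∀ d : Int, 0 ≤ d → d ≤ 4 → (d ≤ x ↔ d ≤ pvCl x) := by
  intro d h0 h4; unfold pvCl; split_ifs <;> omega

def dsum1 (ms : List (Int × Int × Int)) : Int := (ms.map (·.1)).sum
def dsum2 (ms : List (Int × Int × Int)) : Int := (ms.map (·.2.1)).sum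
def dsum3 (ms : List (Int × Int × Int)) : Int := (ms.map (·.2.2)).sum

lemma loop_congr (ms : List (Int × Int × Int))
    (hms : ∀ m ∈ ms, 0 ≤ m.1 ∧ 0 ≤ m.2.1 ∧ 0 ≤ m.2.2) :
    ∀ (u u' v v' w w' k : Int),
    (∀ d : Int, 0 ≤ d → d ≤ dsum1 ms → (d ≤ u ↔ d ≤ u')) →
    (∀ d : Int, 0 ≤ d → d ≤ dsum2 ms → (d ≤ v ↔ d ≤ v')) →
    (∀ d : Int, 0 ≤ d → d ≤ dsum3 ms → (d ≤ w ↔ d ≤ w')) →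
    (ms.foldl solveStep (u, v, w, k)).2.2.2 = (ms.foldl solveStep (u', v', w', k)).2.2.2 := by
  induction ms with
  | nil => intro u u' v v' w w' k _ _ _; rfl
  | cons m ms ih =>
    intro u u' v v' w w' k hu hv hw
    obtain ⟨da, db, dc⟩ := m
    obtain ⟨h1, h2, h3⟩ := hms _ (List.mem_cons_self ..)
    simp only at h1 h2 h3
    have hms' : ∀ m ∈ ms, 0 ≤ m.1 ∧ 0 ≤ m.2.1 ∧ 0 ≤ m.2.2 :=
      fun m hm => hms m (List.mem_cons_of_mem _ hm)
    have s1 : 0 ≤ dsum1 ms := by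
      unfold dsum1; apply List.sum_nonneg; intro x hx
      obtain ⟨m, hm, rfl⟩ := List.mem_map.mp hx; exact (hms' m hm).1
    have s2 : 0 ≤ dsum2 ms := by
      unfold dsum2; apply List.sum_nonneg; intro x hx
      obtain ⟨m, hm, rfl⟩ := List.mem_map.mp hx; exact (hms' m hm).2.1
    have s3 : 0 ≤ dsum3 ms := by
      unfold dsum3; apply List.sum_nonneg; intro x hx
      obtain ⟨m, hm, rfl⟩ := List.mem_map.mp hx; exact (hms' m hm).2.2
    have e1 : dsum1 ((da, db, dc) :: ms) = da + dsum1 ms := by simp [dsum1]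
    have e2 : dsum2 ((da, db, dc) :: ms) = db + dsum2 ms := by simp [dsum2]
    have e3 : dsum3 ((da, db, dc) :: ms) = dc + dsum3 ms := by simp [dsum3]
    have hu0 := hu da h1 (by rw [e1]; omega)
    have hv0 := hv db h2 (by rw [e2]; omega)
    have hw0 := hw dc h3 (by rw [e3]; omega)
    have hcond : (u ≥ da ∧ v ≥ db ∧ w ≥ dc) ↔ (u' ≥ da ∧ v' ≥ db ∧ w' ≥ dc) := by
      constructor <;> rintro ⟨ha, hb, hc⟩
      · exact ⟨hu0.mp ha, hv0.mp hb, hw0.mp hc⟩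
      · exact ⟨hu0.mpr ha, hv0.mpr hb, hw0.mpr hc⟩
    simp only [List.foldl_cons, solveStep]
    by_cases hC : u ≥ da ∧ v ≥ db ∧ w ≥ dc
    · rw [if_pos hC, if_pos (hcond.mp hC)]
      apply ih hms'
      · intro d h0 hd
        have := hu (d + da) (by omega) (by rw [e1]; omega); constructor <;> intro <;> omega
      · intro d h0 hd
        have := hv (d + db) (by omega) (by rw [e2]; omega); constructor <;> intro <;> omega
      · intro d h0 hd
        have := hw (d + dc) (by omega) (by rw [e3]; omega); constructor <;> intro <;> omega
    · rw [if_neg hC, if_neg (fun h => hC (hcond.mpr h))]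
      apply ih hms'
      · intro d h0 hd; exact hu d h0 (by rw [e1]; omega)
      · intro d h0 hd; exact hv d h0 (by rw [e2]; omega)
      · intro d h0 hd; exact hw d h0 (by rw [e3]; omega)

set_option maxRecDepth 8192 in
lemma demand_bounds : ∀ m ∈ PySem.List.pyRange 0 128 1,
    (0 ≤ (pvDemand m).1 ∧ (pvDemand m).1 ≤ 4) ∧
    (0 ≤ (pvDemand m).2.1 ∧ (pvDemand m).2.1 ≤ 4) ∧
    (0 ≤ (pvDemand m).2.2.1 ∧ (pvDemand m).2.2.1 ≤ 4) := by decide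

lemma alt_congr (a a' b b' c c' : Int)
    (ha : ∀ d : Int, 0 ≤ d → d ≤ 4 → (d ≤ a ↔ d ≤ a'))
    (hb : ∀ d : Int, 0 ≤ d → d ≤ 4 → (d ≤ b ↔ d ≤ b'))
    (hc : ∀ d : Int, 0 ≤ d → d ≤ 4 → (d ≤ c ↔ d ≤ c')) :
    solve_alt a b c = solve_alt a' b' c' := by
  unfold solve_alt
  apply PySem.List.foldl_congr_mem
  intro best m hm
  obtain ⟨⟨b1, b2⟩, ⟨b3, b4⟩, ⟨b5, b6⟩⟩ := demand_bounds m hm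
  rcases hp : pvDemand m with ⟨da, db, dc, n⟩
  rw [hp] at b1 b2 b3 b4 b5 b6
  simp only at b1 b2 b3 b4 b5 b6
  have hiff : (da ≤ a ∧ db ≤ b ∧ dc ≤ c ∧ n > best) ↔ (da ≤ a' ∧ db ≤ b' ∧ dc ≤ c' ∧ n > best) := by
    constructor <;> rintro ⟨x1, x2, x3, x4⟩
    · exact ⟨(ha da b1 b2).mp x1, (hb db b3 b4).mp x2, (hc dc b5 b6).mp x3, x4⟩
    · exact ⟨(ha da b1 b2).mpr x1, (hb db b3 b4).mpr x2, (hc dc b5 b6).mpr x3, x4⟩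
  exact if_congr hiff rfl rfl


-- on the clamped window both programs agree, checked exhaustively
set_option maxRecDepth 100000 in
set_option maxHeartbeats 2000000 in
lemma finite_eq : ∀ x ∈ Finset.Icc (-1 : Int) 4, ∀ y ∈ Finset.Icc (-1 : Int) 4,
    ∀ z ∈ Finset.Icc (-1 : Int) 4, solve x y z = solve_alt x y z := by decide

lemma sorted_map_cl (l : List Int) :
    PySem.List.sorted (l.map pvCl) (fun x => x) false
      = (PySem.List.sorted l (fun x => x) false).map pvCl := by
  apply PySem.List.sorted_id_eq_of_perm_of_pairwise
  · exact (PySem.List.sorted_perm l _ _).map pvCl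
  · exact List.Pairwise.map _ (fun a b h => pvCl_mono h) (PySem.List.sorted_pairwise l _)

-- ===== VERDICT (by name: the statement is the Claim_ definition above) =====
theorem solve_spec : Claim_equal_solve := by
  intro a b c _
  unfold Spec_solve
  have hlen : (PySem.List.sorted [a, b, c] (fun x => x) false).length = 3 := by
    rw [PySem.List.length_sorted]; rfl
  obtain ⟨x, y, z, hxyz⟩ := List.length_eq_three.mp hlen
  have hA : solve a b c
      = (([(0,0,1),(0,1,0),(1,0,0),(0,1,1),(1,0,1),(1,1,0),(1,1,1)] :
          List (Int × Int × Int)).foldl solveStep (x, y, z, 0)).2.2.2 := by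
    unfold solve; rw [hxyz]
  have hsortC : PySem.List.sorted [pvCl a, pvCl b, pvCl c] (fun x => x) false
      = [pvCl x, pvCl y, pvCl z] := by
    have h := sorted_map_cl [a, b, c]
    rw [hxyz] at h
    simpa using h
  have hA' : solve (pvCl a) (pvCl b) (pvCl c)
      = (([(0,0,1),(0,1,0),(1,0,0),(0,1,1),(1,0,1),(1,1,0),(1,1,1)] :
          List (Int × Int × Int)).foldl solveStep (pvCl x, pvCl y, pvCl z, 0)).2.2.2 := by
    unfold solve; rw [hsortC]
  have hd1 : dsum1 ([(0,0,1),(0,1,0),(1,0,0),(0,1,1),(1,0,1),(1,1,0),(1,1,1)] :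
      List (Int × Int × Int)) = 4 := by decide
  have hd2 : dsum2 ([(0,0,1),(0,1,0),(1,0,0),(0,1,1),(1,0,1),(1,1,0),(1,1,1)] :
      List (Int × Int × Int)) = 4 := by decide
  have hd3 : dsum3 ([(0,0,1),(0,1,0),(1,0,0),(0,1,1),(1,0,1),(1,1,0),(1,1,1)] :
      List (Int × Int × Int)) = 4 := by decide
  have hloop := loop_congr
    ([(0,0,1),(0,1,0),(1,0,0),(0,1,1),(1,0,1),(1,1,0),(1,1,1)] : List (Int × Int × Int))
    (by decide) x (pvCl x) y (pvCl y) z (pvCl z) 0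
    (fun d h0 hd => pvCl_iff x d h0 (by omega))
    (fun d h0 hd => pvCl_iff y d h0 (by omega))
    (fun d h0 hd => pvCl_iff z d h0 (by omega))
  have hfin : solve (pvCl a) (pvCl b) (pvCl c) = solve_alt (pvCl a) (pvCl b) (pvCl c) :=
    finite_eq _ (pvCl_mem a) _ (pvCl_mem b) _ (pvCl_mem c)
  have halt : solve_alt (pvCl a) (pvCl b) (pvCl c) = solve_alt a b c :=
    alt_congr _ _ _ _ _ _
      (fun d h0 h4 => (pvCl_iff a d h0 h4).symm)
      (fun d h0 h4 => (pvCl_iff b d h0 h4).symm)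
      (fun d h0 h4 => (pvCl_iff c d h0 h4).symm)
  rw [hA, hloop, ← hA', hfin, halt]
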